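-- pv_equiv track=rewrite | github.com/Goo-JZhang/SESSDSA | 网课作业/Week5/OJ.py | Splist
-- ===== SOURCE A (Python) =====
-- def Splist(dim,astr):
--     if dim==1:
--         resultlist=[[astr,astr,astr],[astr,' '*len(astr),astr],[astr,astr,astr]]
--         return resultlist
--     else:
--         templist=Splist(dim-1,astr)
--         newlist=[]
--         for i in range(3**(dim-1)):
--             newlist.append(templist[i]+templist[i]+templist[i])
--         Nonelist=[]
--         for i in range(3**(dim-1)):
--             Nonelist.append(' '*len(astr))
--         for i in range(3**(dim-1)):
--             newlist.append(templist[i]+Nonelist+templist[i])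
--         for i in range(3**(dim-1)):
--             newlist.append(templist[i]+templist[i]+templist[i])
--         return newlist
-- ===== SOURCE B (Python) =====
-- def Splist(dim, astr):
--     n = 3 ** dim
--     blank = ' ' * len(astr)
--     # digit mask: bit i set iff base-3 digit i of x is 1; a cell (r, c) is blank
--     # iff masks share a set bit, i.e. some digit position is 1 in both coordinates
--     masks = [sum(1 << i for i in range(dim) if (x // 3 ** i) % 3 == 1) for x in range(n)]
--     rows = {}
--     result = []
--     for r in range(n):
--         m = masks[r]
--         if m not in rows:
--             rows[m] = [blank if m & masks[c] else astr for c in range(n)]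
--         result.append(rows[m])
--     return result
-- ===== Notes on version B (the rewrite author's own statement) =====
-- stated objective: alternative
-- what changed: Replaced the recursive horizontal/vertical tripling of the (dim-1) carpet by a direct double comprehension over the 3^dim x 3^dim grid that decides each cell with a closed-form base-3 digit test (cell is blank iff some base-3 digit position is 1 in both coordinates).
import Mathlib
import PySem

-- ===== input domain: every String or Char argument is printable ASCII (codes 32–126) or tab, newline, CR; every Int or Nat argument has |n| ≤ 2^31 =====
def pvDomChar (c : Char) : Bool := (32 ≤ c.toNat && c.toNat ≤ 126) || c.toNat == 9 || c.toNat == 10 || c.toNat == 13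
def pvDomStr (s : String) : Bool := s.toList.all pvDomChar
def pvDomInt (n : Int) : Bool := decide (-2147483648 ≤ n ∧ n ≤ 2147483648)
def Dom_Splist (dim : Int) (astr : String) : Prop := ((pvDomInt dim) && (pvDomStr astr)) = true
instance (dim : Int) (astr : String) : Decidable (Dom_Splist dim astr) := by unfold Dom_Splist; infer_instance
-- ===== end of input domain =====

-- B replaces A's recursive tripling by a per-cell base-3 digit test over the 3^dim grid (alternative algorithm, same cost).

-- ' ' * len(astr)  (exact hand port: a string of astr-many spaces)
def pyBlank (astr : String) : String := String.ofList (List.replicate astr.toList.length ' ')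

-- ===== PORT A =====
-- fuel recursion on dim.toNat; A diverges for dim <= 0 (excluded by Pre_), fuel 0 is unreachable there
def SplistGo (astr : String) : Nat → List (List String)
  | 0 => []
  | 1 => [[astr, astr, astr], [astr, pyBlank astr, astr], [astr, astr, astr]]
  | n + 2 =>
    let temp := SplistGo astr (n + 1)
    let newlist := (List.range (3 ^ (n + 1))).foldl
      (fun acc i => acc ++ [temp.getD i [] ++ temp.getD i [] ++ temp.getD i []]) []
    let nonel := (List.range (3 ^ (n + 1))).foldl (fun acc _ => acc ++ [pyBlank astr]) []
    let newlist2 := (List.range (3 ^ (n + 1))).foldl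
      (fun acc i => acc ++ [temp.getD i [] ++ nonel ++ temp.getD i []]) newlist
    (List.range (3 ^ (n + 1))).foldl
      (fun acc i => acc ++ [temp.getD i [] ++ temp.getD i [] ++ temp.getD i []]) newlist2

def Splist (dim : Int) (astr : String) : List (List String) := SplistGo astr dim.toNat

-- ===== PORT B =====
-- sum(1 << i for i in range(dim) if (x // 3**i) % 3 == 1)
def maskF (d : Nat) (x : Nat) : Nat :=
  ((List.range d).filter (fun i => x / 3 ^ i % 3 == 1)).foldl (fun acc i => acc + (1 <<< i)) 0

-- [blank if m & masks[c] else astr for c in range(n)]  (masks[c] is provably in range, ported as getD)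
def rowB (astr blank : String) (n : Nat) (masks : List Nat) (m : Nat) : List String :=
  (List.range n).map (fun c => if m &&& masks.getD c 0 != 0 then blank else astr)

-- one iteration of the 'for r in range(n)' loop: consult/extend the row cache, append the row
def stepB (astr blank : String) (n : Nat) (masks : List Nat)
    (st : PySem.Dict Nat (List String) × List (List String)) (r : Nat) :
    PySem.Dict Nat (List String) × List (List String) :=
  let m := masks.getD r 0
  let rows := if st.1.contains m then st.1 else st.1.insert m (rowB astr blank n masks m)
  (rows, st.2 ++ [rows.getD m []])

def Splist_alt (dim : Int) (astr : String) : List (List String) :=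
  let d := dim.toNat
  let n := 3 ^ d
  let blank := pyBlank astr
  let masks := (List.range n).map (maskF d)
  ((List.range n).foldl (stepB astr blank n masks) (PySem.Dict.empty, [])).2

-- ===== PRECONDITION & SPEC =====
-- A recurses forever (RecursionError) for dim <= 0, so only dim >= 1 is admitted.
def Pre_Splist (dim : Int) (astr : String) : Prop := 1 ≤ dim
instance (dim : Int) (astr : String) : Decidable (Pre_Splist dim astr) := by unfold Pre_Splist; infer_instance
def pvWitness_Splist : Int × String := (2, "ab")

def Spec_Splist (dim : Int) (astr : String) (out : List (List String)) : Prop := out = Splist_alt dim astr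
instance (dim : Int) (astr : String) (out : List (List String)) : Decidable (Spec_Splist dim astr out) := by unfold Spec_Splist; infer_instance

-- ===== CLAIM (what is proved, stated in full; the proofs are below) =====
def Claim_equal_Splist : Prop := ∀ (dim : Int) (astr : String), Dom_Splist dim astr → Pre_Splist dim astr → Spec_Splist dim astr (Splist dim astr)

-- ===== LEMMAS AND PROOFS =====

-- B's per-cell predicate and grid, as named functions (definitionally what Splist_alt computes)
def bcell (r c i : Nat) : Bool := (r / 3 ^ i % 3 == 1) && (c / 3 ^ i % 3 == 1)

def cellF (astr : String) (d r c : Nat) : String :=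
  if (List.range d).any (bcell r c) then pyBlank astr else astr

def gridF (astr : String) (d : Nat) : List (List String) :=
  (List.range (3 ^ d)).map (fun r => (List.range (3 ^ d)).map (cellF astr d r))

lemma getD_map_range {α : Type} (f : Nat → α) (dflt : α) {i N : Nat} (h : i < N) :
    (((List.range N).map f).getD i dflt) = f i := by
  simp [List.getD, h]

lemma maskF_succ (d x : Nat) :
    maskF (d + 1) x = maskF d x + (if x / 3 ^ d % 3 == 1 then 2 ^ d else 0) := by
  unfold maskF
  rw [List.range_succ, List.filter_append, List.foldl_append]
  by_cases h : (x / 3 ^ d % 3 == 1) = true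
  · simp [h, Nat.one_shiftLeft]
  · simp [h]

lemma maskF_lt (d x : Nat) : maskF d x < 2 ^ d := by
  induction d with
  | zero => simp [maskF]
  | succ d ih => rw [maskF_succ, pow_succ]; split <;> omega

lemma testBit_maskF (d x j : Nat) :
    (maskF d x).testBit j = (decide (j < d) && (x / 3 ^ j % 3 == 1)) := by
  induction d with
  | zero => simp [maskF]
  | succ d ih =>
    by_cases hj : j < d
    · rw [maskF_succ]
      by_cases hc : (x / 3 ^ d % 3 == 1) = true
      · rw [if_pos hc, Nat.add_comm, Nat.testBit_two_pow_add_gt hj, ih]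
        simp [hj, Nat.lt_succ_of_lt hj]
      · rw [if_neg hc, Nat.add_zero, ih]
        simp [hj, Nat.lt_succ_of_lt hj]
    · by_cases hjd : j = d
      · subst hjd
        rw [maskF_succ]
        by_cases hc : (x / 3 ^ j % 3 == 1) = true
        · rw [if_pos hc, Nat.add_comm, Nat.testBit_two_pow_add_eq,
            Nat.testBit_eq_false_of_lt (maskF_lt j x)]
          simp [hc]
        · rw [if_neg hc, Nat.add_zero, Nat.testBit_eq_false_of_lt (maskF_lt j x)]
          simp [hc]
      · have hjd' : d + 1 ≤ j := by omega
        have hlt : maskF (d + 1) x < 2 ^ j :=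
          lt_of_lt_of_le (maskF_lt (d + 1) x) (Nat.pow_le_pow_right (by omega) hjd')
        rw [Nat.testBit_eq_false_of_lt hlt, decide_eq_false (by omega : ¬ j < d + 1), Bool.false_and]

lemma land_ne_zero {a b : Nat} :
    (a &&& b != 0) = true ↔ ∃ j, a.testBit j = true ∧ b.testBit j = true := by
  constructor
  · intro h
    by_contra hno
    have hno' : ∀ i, a.testBit i = true → b.testBit i ≠ true :=
      fun i hai hbi => hno ⟨i, hai, hbi⟩
    have hz : a &&& b = 0 := by
      apply Nat.zero_of_testBit_eq_false
      intro i
      rw [Nat.testBit_land]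
      cases ha : a.testBit i
      · simp
      · simp [Bool.eq_false_iff.mpr (hno' i ha)]
    simp [hz] at h
  · rintro ⟨j, ha, hb⟩
    by_contra h
    have hz : a &&& b = 0 := by simpa using h
    have := Nat.testBit_land a b j
    rw [hz, Nat.zero_testBit, ha, hb] at this
    simp at this

lemma mask_cell (d r c : Nat) :
    (maskF d r &&& maskF d c != 0) = (List.range d).any (bcell r c) := by
  rw [Bool.eq_iff_iff, land_ne_zero, List.any_eq_true]
  constructor
  · rintro ⟨j, h1, h2⟩
    rw [testBit_maskF] at h1 h2
    rw [Bool.and_eq_true, decide_eq_true_eq] at h1 h2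
    exact ⟨j, List.mem_range.mpr h1.1, by simp [bcell, h1.2, h2.2]⟩
  · rintro ⟨i, hi, hb⟩
    rw [List.mem_range] at hi
    unfold bcell at hb
    rw [Bool.and_eq_true] at hb
    refine ⟨i, ?_, ?_⟩ <;> rw [testBit_maskF, Bool.and_eq_true, decide_eq_true_eq]
    · exact ⟨hi, hb.1⟩
    · exact ⟨hi, hb.2⟩

lemma loop_spec (astr blank : String) (n : Nat) (masks : List Nat) :
    ∀ (l : List Nat) (rows : PySem.Dict Nat (List String)) (acc : List (List String)),
      (∀ k, rows.contains k = true → rows.getD k [] = rowB astr blank n masks k) →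
      (l.foldl (stepB astr blank n masks) (rows, acc)).2 =
        acc ++ l.map (fun r => rowB astr blank n masks (masks.getD r 0)) := by
  intro l
  induction l with
  | nil => intro rows acc _; simp
  | cons r l ih =>
    intro rows acc hinv
    by_cases hc : rows.contains (masks.getD r 0) = true
    · have hstep : stepB astr blank n masks (rows, acc) r =
          (rows, acc ++ [rowB astr blank n masks (masks.getD r 0)]) := by
        simp only [stepB]
        rw [if_pos hc, hinv _ hc]
      rw [List.foldl_cons, hstep, ih rows _ hinv]
      simp
    · have hinv' : ∀ k,
          (rows.insert (masks.getD r 0) (rowB astr blank n masks (masks.getD r 0))).contains k = true →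
          (rows.insert (masks.getD r 0) (rowB astr blank n masks (masks.getD r 0))).getD k [] =
            rowB astr blank n masks k := by
        intro k hk
        rw [PySem.Dict.getD_insert]
        by_cases hkm : k = masks.getD r 0
        · rw [if_pos hkm, hkm]
        · rw [if_neg hkm]
          apply hinv
          rw [PySem.Dict.contains_insert, Bool.or_eq_true, beq_iff_eq] at hk
          rcases hk with h | h
          · exact absurd h hkm
          · exact h
      have hstep : stepB astr blank n masks (rows, acc) r =
          (rows.insert (masks.getD r 0) (rowB astr blank n masks (masks.getD r 0)),
            acc ++ [rowB astr blank n masks (masks.getD r 0)]) := by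
        simp only [stepB]
        rw [if_neg hc, PySem.Dict.getD_insert_self]
      rw [List.foldl_cons, hstep, ih _ _ hinv']
      simp

lemma alt_eq_grid (dim : Int) (astr : String) : Splist_alt dim astr = gridF astr dim.toNat := by
  simp only [Splist_alt]
  rw [loop_spec _ _ _ _ _ _ _ (fun k hk => by rw [PySem.Dict.contains_empty] at hk; cases hk)]
  rw [List.nil_append]
  unfold gridF
  apply List.map_congr_left
  intro r hr
  rw [List.mem_range] at hr
  rw [getD_map_range _ _ hr]
  unfold rowB
  apply List.map_congr_left
  intro c hc
  rw [List.mem_range] at hc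
  rw [getD_map_range _ _ hc, mask_cell]
  rfl

-- a Python append-loop is init ++ map
lemma foldl_push {α β : Type} (f : α → β) (l : List α) (init : List β) :
    l.foldl (fun acc i => acc ++ [f i]) init = init ++ l.map f := by
  induction l generalizing init with
  | nil => simp
  | cons x xs ih => simp [List.foldl_cons, ih]

lemma any_congr' {α : Type} (p q : α → Bool) (l : List α) (h : ∀ x ∈ l, p x = q x) :
    l.any p = l.any q := by
  induction l with
  | nil => rfl
  | cons x xs ih => simp only [List.any_cons, h x (by simp), ih (fun y hy => h y (by simp [hy]))]

-- base-3 digits below d only depend on r % 3^d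
lemma digit_lt {i d : Nat} (r : Nat) (h : i < d) :
    r / 3 ^ i % 3 = r % 3 ^ d / 3 ^ i % 3 := by
  conv_lhs => rw [← Nat.div_add_mod r (3 ^ d)]
  have hd : 3 ^ d = 3 ^ i * (3 * 3 ^ (d - i - 1)) := by
    rw [← pow_succ']
    rw [← pow_add]
    congr 1
    omega
  rw [hd, Nat.add_comm, Nat.mul_assoc, Nat.mul_comm (3 ^ i), Nat.mul_comm (3 * 3 ^ (d - i - 1))]
  rw [Nat.add_mul_div_left _ _ (by positivity : 0 < 3 ^ i)]
  have : (3 * 3 ^ (d - i - 1)) * (r / (3 ^ i * (3 * 3 ^ (d - i - 1)))) =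
      3 * (3 ^ (d - i - 1) * (r / (3 ^ i * (3 * 3 ^ (d - i - 1))))) := by ring
  rw [this, Nat.add_mul_mod_self_left]

lemma cell_succ (astr : String) {d r c : Nat} (hr : r < 3 ^ (d + 1)) (hc : c < 3 ^ (d + 1)) :
    cellF astr (d + 1) r c =
      if r / 3 ^ d = 1 ∧ c / 3 ^ d = 1 then pyBlank astr
      else cellF astr d (r % 3 ^ d) (c % 3 ^ d) := by
  have hr3 : r / 3 ^ d < 3 := by
    apply Nat.div_lt_of_lt_mul; rw [Nat.mul_comm]; rw [pow_succ] at hr; omega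
  have hc3 : c / 3 ^ d < 3 := by
    apply Nat.div_lt_of_lt_mul; rw [Nat.mul_comm]; rw [pow_succ] at hc; omega
  unfold cellF
  rw [List.range_succ, List.any_append]
  have hlow : (List.range d).any (bcell r c) = (List.range d).any (bcell (r % 3 ^ d) (c % 3 ^ d)) := by
    apply any_congr'
    intro i hi
    rw [List.mem_range] at hi
    unfold bcell
    rw [digit_lt r hi, digit_lt c hi]
  rw [hlow]
  have htop : (List.any [d] (bcell r c)) = decide (r / 3 ^ d = 1 ∧ c / 3 ^ d = 1) := by
    simp only [List.any_cons, List.any_nil, Bool.or_false, bcell]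
    rw [Nat.mod_eq_of_lt hr3, Nat.mod_eq_of_lt hc3]
    by_cases h1 : r / 3 ^ d = 1 <;> by_cases h2 : c / 3 ^ d = 1 <;> simp [h1, h2]
  rw [htop]
  by_cases h : r / 3 ^ d = 1 ∧ c / 3 ^ d = 1
  · simp [h]
  · simp [h]

lemma range_pow_succ (d : Nat) :
    List.range (3 ^ (d + 1)) =
      List.range (3 ^ d) ++ (List.range (3 ^ d)).map (fun c => 3 ^ d + c)
        ++ (List.range (3 ^ d)).map (fun c => 3 ^ d + (3 ^ d + c)) := by
  have h : 3 ^ (d + 1) = 3 ^ d + (3 ^ d + 3 ^ d) := by rw [pow_succ]; ring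
  rw [h, List.range_add, List.range_add, List.map_append, List.map_map, List.append_assoc]
  rfl

lemma cell_top (astr : String) (m : Nat) {q r p c : Nat} (hq : q < 3) (hr : r < 3 ^ (m + 1))
    (hp : p < 3) (hc : c < 3 ^ (m + 1)) :
    cellF astr (m + 2) (q * 3 ^ (m + 1) + r) (p * 3 ^ (m + 1) + c) =
      if q = 1 ∧ p = 1 then pyBlank astr else cellF astr (m + 1) r c := by
  have hN : 0 < 3 ^ (m + 1) := by positivity
  have h32 : (3 : Nat) ^ (m + 2) = 3 ^ (m + 1) * 3 := by rw [pow_succ]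
  have hb1 : q * 3 ^ (m + 1) + r < 3 ^ (m + 2) := by rw [h32]; nlinarith
  have hb2 : p * 3 ^ (m + 1) + c < 3 ^ (m + 2) := by rw [h32]; nlinarith
  rw [cell_succ astr hb1 hb2]
  have hd1 : (q * 3 ^ (m + 1) + r) / 3 ^ (m + 1) = q := by
    rw [Nat.add_comm, Nat.add_mul_div_right _ _ hN, Nat.div_eq_of_lt hr]; omega
  have hm1 : (q * 3 ^ (m + 1) + r) % 3 ^ (m + 1) = r := by
    rw [Nat.add_comm, Nat.add_mul_mod_self_right, Nat.mod_eq_of_lt hr]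
  have hd2 : (p * 3 ^ (m + 1) + c) / 3 ^ (m + 1) = p := by
    rw [Nat.add_comm, Nat.add_mul_div_right _ _ hN, Nat.div_eq_of_lt hc]; omega
  have hm2 : (p * 3 ^ (m + 1) + c) % 3 ^ (m + 1) = c := by
    rw [Nat.add_comm, Nat.add_mul_mod_self_right, Nat.mod_eq_of_lt hc]
  rw [hd1, hm1, hd2, hm2]

lemma main_eq (astr : String) : ∀ n : Nat, SplistGo astr (n + 1) = gridF astr (n + 1) := by
  intro n
  induction n with
  | zero => rfl
  | succ m ih =>
    show SplistGo astr (m + 2) = gridF astr (m + 2)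
    simp only [SplistGo, ih, foldl_push, List.nil_append]
    conv_rhs => rw [gridF, range_pow_succ (m + 1)]
    simp only [List.map_append, List.map_map, Function.comp_def]
    have hT : ∀ r : Nat, r < 3 ^ (m + 1) →
        (gridF astr (m + 1)).getD r [] = (List.range (3 ^ (m + 1))).map (cellF astr (m + 1) r) := by
      intro r hr
      simp only [gridF]
      rw [getD_map_range _ _ hr]
    congr 1
    · congr 1
      · -- top band
        apply List.map_congr_left; intro r hr; rw [List.mem_range] at hr
        rw [hT r hr]
        conv_rhs => rw [show r = 0 * 3 ^ (m + 1) + r by ring]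
        congr 1
        · congr 1
          · apply List.map_congr_left; intro c hc; rw [List.mem_range] at hc; rw [show c = 0 * 3 ^ (m + 1) + c by ring]; rw [cell_top astr m (by omega) hr (by omega) hc]; simp
          · apply List.map_congr_left; intro c hc; rw [List.mem_range] at hc; rw [show 3 ^ (m + 1) + c = 1 * 3 ^ (m + 1) + c by ring]; rw [cell_top astr m (by omega) hr (by omega) hc]; simp
        · apply List.map_congr_left; intro c hc; rw [List.mem_range] at hc; rw [show 3 ^ (m + 1) + (3 ^ (m + 1) + c) = 2 * 3 ^ (m + 1) + c by ring]; rw [cell_top astr m (by omega) hr (by omega) hc]; simp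
      · -- middle band
        apply List.map_congr_left; intro r hr; rw [List.mem_range] at hr
        rw [hT r hr]
        conv_rhs => rw [show 3 ^ (m + 1) + r = 1 * 3 ^ (m + 1) + r by ring]
        congr 1
        · congr 1
          · apply List.map_congr_left; intro c hc; rw [List.mem_range] at hc; rw [show c = 0 * 3 ^ (m + 1) + c by ring]; rw [cell_top astr m (by omega) hr (by omega) hc]; simp
          · apply List.map_congr_left; intro c hc; rw [List.mem_range] at hc; rw [show 3 ^ (m + 1) + c = 1 * 3 ^ (m + 1) + c by ring]; rw [cell_top astr m (by omega) hr (by omega) hc]; simp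
        · apply List.map_congr_left; intro c hc; rw [List.mem_range] at hc; rw [show 3 ^ (m + 1) + (3 ^ (m + 1) + c) = 2 * 3 ^ (m + 1) + c by ring]; rw [cell_top astr m (by omega) hr (by omega) hc]; simp
    · -- bottom band
      apply List.map_congr_left; intro r hr; rw [List.mem_range] at hr
      rw [hT r hr]
      conv_rhs => rw [show 3 ^ (m + 1) + (3 ^ (m + 1) + r) = 2 * 3 ^ (m + 1) + r by ring]
      congr 1
      · congr 1
        · apply List.map_congr_left; intro c hc; rw [List.mem_range] at hc; rw [show c = 0 * 3 ^ (m + 1) + c by ring]; rw [cell_top astr m (by omega) hr (by omega) hc]; simp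
        · apply List.map_congr_left; intro c hc; rw [List.mem_range] at hc; rw [show 3 ^ (m + 1) + c = 1 * 3 ^ (m + 1) + c by ring]; rw [cell_top astr m (by omega) hr (by omega) hc]; simp
      · apply List.map_congr_left; intro c hc; rw [List.mem_range] at hc; rw [show 3 ^ (m + 1) + (3 ^ (m + 1) + c) = 2 * 3 ^ (m + 1) + c by ring]; rw [cell_top astr m (by omega) hr (by omega) hc]; simp

-- ===== VERDICT (by name: the statement is the Claim_ definition above) =====
theorem Splist_spec : Claim_equal_Splist := by
  intro dim astr _ hpre
  unfold Spec_Splist Splist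
  rw [alt_eq_grid]
  have h1 : 1 ≤ dim.toNat := by unfold Pre_Splist at hpre; omega
  obtain ⟨n, hn⟩ : ∃ n, dim.toNat = n + 1 := ⟨dim.toNat - 1, by omega⟩
  rw [hn, main_eq]
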